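-- pv_equiv track=rewrite | github.com/ant-louis/netbert-search | index_creation/tools/download_all.py | concat_rfc_lines
-- ===== SOURCE A (Python) =====
-- def concat_rfc_lines(lines):
--     """
--     Given a list of lines where a same RFC is described on multiple lines, concat
--     the lines describing the same RFC.
--     """
--     rfc_lines = []
--     current_rfc = ''
--     for line in lines:
--         if line.startswith('RFC'):
--             rfc_lines.append(current_rfc)  # End of previous RFC, append it to list.
--             current_rfc = line  # Get beginning of new rfc.
--         else:
--             current_rfc += line
--     return rfc_lines
-- ===== SOURCE B (Python) =====
-- def concat_rfc_lines(lines):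
--     """
--     Given a list of lines where a same RFC is described on multiple lines, concat
--     the lines describing the same RFC.
--
--     Two-phase version: first index the boundary positions (lines starting with
--     'RFC'), then join the slice between consecutive boundaries.
--     """
--     idx = [i for i, line in enumerate(lines) if line.startswith('RFC')]
--     rfc_lines = []
--     prev = 0
--     for j in idx:
--         rfc_lines.append(''.join(lines[prev:j]))
--         prev = j
--     return rfc_lines
-- ===== Notes on version B (the rewrite author's own statement) =====
-- stated objective: alternative
-- what changed: A's single loop that accumulates the current block into a growing string is replaced by two phases: first index the positions of lines starting with 'RFC', then emit the join of the slice of lines between consecutive boundaries.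
import Mathlib
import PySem

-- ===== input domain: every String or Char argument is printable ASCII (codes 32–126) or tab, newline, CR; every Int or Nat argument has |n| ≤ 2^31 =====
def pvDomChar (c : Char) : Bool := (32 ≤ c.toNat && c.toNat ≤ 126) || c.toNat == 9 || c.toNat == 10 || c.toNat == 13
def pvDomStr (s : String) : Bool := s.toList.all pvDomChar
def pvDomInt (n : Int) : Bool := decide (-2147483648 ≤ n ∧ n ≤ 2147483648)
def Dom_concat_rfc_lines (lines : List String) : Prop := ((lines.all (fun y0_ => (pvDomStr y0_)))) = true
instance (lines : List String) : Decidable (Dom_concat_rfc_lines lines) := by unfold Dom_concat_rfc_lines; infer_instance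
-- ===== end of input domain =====

-- B replaces A's single accumulating loop by two phases: index the 'RFC' boundary
-- positions, then join the slice of lines between consecutive boundaries (objective: alternative decomposition).


-- ===== PORT A =====
def concat_rfc_lines (lines : List String) : List String :=
  (lines.foldl
    (fun (st : List String × String) line =>
      if PySem.Str.startswith line "RFC" then (st.1 ++ [st.2], line)
      else (st.1, st.2 ++ line))
    ([], "")).1

-- ===== PORT B =====
def concat_rfc_lines_alt (lines : List String) : List String :=
  ((((PySem.List.enumerate lines 0).filter (fun q => PySem.Str.startswith q.2 "RFC")).map (·.1)).foldl
    (fun (st : List String × Int) j =>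
      (st.1 ++ [PySem.Str.join "" (PySem.List.slice lines (some st.2) (some j))], j))
    ([], 0)).1

-- ===== PRECONDITION & SPEC =====
def Spec_concat_rfc_lines (lines : List String) (out : List String) : Prop := out = concat_rfc_lines_alt lines
instance (lines : List String) (out : List String) : Decidable (Spec_concat_rfc_lines lines out) := by unfold Spec_concat_rfc_lines; infer_instance

-- ===== CLAIM (what is proved, stated in full; the proofs are below) =====
def Claim_equal_concat_rfc_lines : Prop := ∀ (lines : List String), Dom_concat_rfc_lines lines → Spec_concat_rfc_lines lines (concat_rfc_lines lines)

-- ===== LEMMAS AND PROOFS =====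

-- the boundary test both programs use
def pvB (l : String) : Bool := PySem.Str.startswith l "RFC"

-- A's loop, as a recursion on the remaining lines with the pending string
def pvSpecS : String → List String → List String
  | _, [] => []
  | cur, l :: ls => if pvB l then cur :: pvSpecS l ls else pvSpecS (cur ++ l) ls

-- same recursion, the pending block kept as the list of its lines
def pvSpecL : List String → List String → List String
  | _, [] => []
  | pend, l :: ls =>
    if pvB l then PySem.Str.join "" pend :: pvSpecL [l] ls else pvSpecL (pend ++ [l]) ls

-- boundary positions of the lines, as (relative) Nat indices
def pvNatIdx : List String → List Nat
  | [] => []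
  | l :: ls => if pvB l then 0 :: (pvNatIdx ls).map (· + 1) else (pvNatIdx ls).map (· + 1)

-- B's second loop, as a recursion on the boundary list over Nat indices
def pvSegs (L : List String) : Nat → List Nat → List String
  | _, [] => []
  | prev, j :: js =>
    PySem.Str.join "" (List.take (j - prev) (List.drop prev L)) :: pvSegs L j js

theorem pvJoin_nil_chars : ∀ gs : List (List Char), PySem.Chars.join [] gs = gs.flatten := by
  intro gs
  induction gs with
  | nil => simp [PySem.Chars.join_nil]
  | cons g gs ih =>
    cases gs with
    | nil => simp [PySem.Chars.join_singleton]
    | cons h t => simp [PySem.Chars.join_cons_cons] at ih ⊢; simpa using ih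

theorem pvJoin_append_one (pend : List String) (l : String) :
    PySem.Str.join "" (pend ++ [l]) = PySem.Str.join "" pend ++ l := by
  rw [← String.toList_inj]
  simp [PySem.Str.toList_join, pvJoin_nil_chars]

theorem pvJoin_single (l : String) : PySem.Str.join "" [l] = l := by
  rw [← String.toList_inj]
  simp [PySem.Str.toList_join, pvJoin_nil_chars]

theorem pvJoin_empty : PySem.Str.join "" ([] : List String) = "" := by
  rw [← String.toList_inj]
  simp [PySem.Str.toList_join, pvJoin_nil_chars]

theorem pvSpecS_eq_specL : ∀ (ls pend : List String),
    pvSpecS (PySem.Str.join "" pend) ls = pvSpecL pend ls := by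
  intro ls
  induction ls with
  | nil => intro pend; simp [pvSpecS, pvSpecL]
  | cons l ls ih =>
    intro pend
    cases hb : pvB l with
    | true => simpa [pvSpecS, pvSpecL, hb, pvJoin_single] using ih [l]
    | false => simpa [pvSpecS, pvSpecL, hb, pvJoin_append_one] using ih (pend ++ [l])

theorem pvA_fold : ∀ (ls : List String) (acc : List String) (cur : String),
    (ls.foldl
      (fun (st : List String × String) line =>
        if PySem.Str.startswith line "RFC" then (st.1 ++ [st.2], line)
        else (st.1, st.2 ++ line))
      (acc, cur)).1 = acc ++ pvSpecS cur ls := by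
  intro ls
  induction ls with
  | nil => intro acc cur; simp [pvSpecS]
  | cons l ls ih =>
    intro acc cur
    rw [List.foldl_cons]
    cases hb : pvB l with
    | true =>
      have hb' : PySem.Str.startswith l "RFC" = true := hb
      rw [hb']
      simp only [if_true]
      rw [ih]
      simp [pvSpecS, hb]
    | false =>
      have hb' : PySem.Str.startswith l "RFC" = false := hb
      rw [hb']
      simp only [Bool.false_eq_true, if_false]
      rw [ih]
      simp [pvSpecS, hb]

theorem pvNatIdx_cons_true (l : String) (ls : List String) (hb : pvB l = true) :
    pvNatIdx (l :: ls) = 0 :: (pvNatIdx ls).map (· + 1) := by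
  simp [pvNatIdx, hb]

theorem pvNatIdx_cons_false (l : String) (ls : List String) (hb : pvB l = false) :
    pvNatIdx (l :: ls) = (pvNatIdx ls).map (· + 1) := by
  simp [pvNatIdx, hb]

theorem pvEnum_filter : ∀ (ls : List String) (s : Int),
    (((PySem.List.enumerate ls s).filter (fun q => PySem.Str.startswith q.2 "RFC")).map (·.1))
      = (pvNatIdx ls).map (fun (n : Nat) => s + (n : Int)) := by
  intro ls
  induction ls with
  | nil => intro s; simp [PySem.List.enumerate_nil, pvNatIdx]
  | cons l ls ih =>
    intro s
    rw [PySem.List.enumerate_cons, List.filter_cons]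
    cases hb : pvB l with
    | true =>
      have hb' : PySem.Str.startswith l "RFC" = true := hb
      dsimp only
      rw [hb', if_pos rfl]
      simp only [List.map_cons]
      rw [ih (s + 1), pvNatIdx_cons_true l ls hb]
      simp only [List.map_cons, List.map_map, Nat.cast_zero, add_zero]
      refine congrArg₂ List.cons rfl ?_
      apply List.map_congr_left
      intro n _
      simp [Function.comp]
      push_cast
      ring
    | false =>
      have hb' : PySem.Str.startswith l "RFC" = false := hb
      dsimp only
      rw [hb', if_neg (by simp)]
      rw [ih (s + 1), pvNatIdx_cons_false l ls hb]
      simp only [List.map_map]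
      apply List.map_congr_left
      intro n _
      simp [Function.comp]
      push_cast
      ring

theorem pvB_fold (L : List String) : ∀ (js : List Nat) (out : List String) (prev : Nat),
    (((js.map (fun (n : Nat) => (n : Int))).foldl
      (fun (st : List String × Int) j =>
        (st.1 ++ [PySem.Str.join "" (PySem.List.slice L (some st.2) (some j))], j))
      (out, (prev : Int))).1) = out ++ pvSegs L prev js := by
  intro js
  induction js with
  | nil => intro out prev; simp [pvSegs]
  | cons j js ih =>
    intro out prev
    rw [List.map_cons, List.foldl_cons]
    dsimp only
    rw [PySem.List.slice_natCast, ih]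
    simp [pvSegs]

theorem pvMain : ∀ (ls C pend : List String),
    pvSegs (C ++ (pend ++ ls)) C.length
      ((pvNatIdx ls).map (fun n => C.length + pend.length + n)) = pvSpecL pend ls := by
  intro ls
  induction ls with
  | nil => intro C pend; simp [pvNatIdx, pvSegs, pvSpecL]
  | cons l ls ih =>
    intro C pend
    cases hb : pvB l with
    | true =>
      unfold pvNatIdx pvSpecL
      rw [hb]
      simp only [if_true, List.map_cons, List.map_map]
      simp only [pvSegs]
      refine congrArg₂ List.cons ?_ ?_
      · have hd : List.drop C.length (C ++ (pend ++ l :: ls)) = pend ++ l :: ls := by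
          simp
        have ht : C.length + pend.length + 0 - C.length = pend.length := by omega
        rw [hd, ht]
        congr 1
        simp [List.take_left]
      · have h1 := ih (C ++ pend) [l]
        rw [show C ++ (pend ++ l :: ls) = (C ++ pend) ++ ([l] ++ ls) by simp]
        rw [show C.length + pend.length + 0 = (C ++ pend).length by simp]
        rw [← h1]
        congr 1
        apply List.map_congr_left
        intro n _
        simp [Function.comp]
        omega
    | false =>
      unfold pvNatIdx pvSpecL
      rw [hb]
      simp only [Bool.false_eq_true, if_false, List.map_map]
      have h1 := ih C (pend ++ [l])
      rw [show C ++ (pend ++ l :: ls) = C ++ ((pend ++ [l]) ++ ls) by simp]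
      rw [← h1]
      congr 1
      apply List.map_congr_left
      intro n _
      simp [Function.comp]
      omega

-- ===== VERDICT (by name: the statement is the Claim_ definition above) =====
theorem concat_rfc_lines_spec : Claim_equal_concat_rfc_lines := by
  intro lines _
  unfold Spec_concat_rfc_lines concat_rfc_lines concat_rfc_lines_alt
  rw [pvA_fold]
  have hidx : (((PySem.List.enumerate lines 0).filter (fun q => PySem.Str.startswith q.2 "RFC")).map (·.1))
      = (pvNatIdx lines).map (fun (n : Nat) => (n : Int)) := by
    rw [pvEnum_filter lines 0]
    apply List.map_congr_left
    intro n _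
    omega
  rw [hidx]
  have hB := pvB_fold lines (pvNatIdx lines) [] 0
  rw [show ((0 : Nat) : Int) = (0 : Int) from rfl] at hB
  rw [hB]
  have hA : pvSpecS "" lines = pvSpecL [] lines := by
    have h := pvSpecS_eq_specL lines []
    rwa [pvJoin_empty] at h
  have hM := pvMain lines [] []
  simp only [List.nil_append, List.length_nil, Nat.zero_add, zero_add, List.map_id',
    List.map_id] at hM
  rw [List.nil_append, List.nil_append, hA]
  exact hM.symm
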